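-- pv_equiv track=rewrite | github.com/Tanakiin/DnD-Guide | dndapi.py | dupe
-- ===== SOURCE A (Python) =====
-- def dupe(old):
--     seen = {}
--     for x in old:
--         if x in seen:
--             seen[x] += 1
--             yield "%s(%d)" % (x, seen[x])
--         else:
--             seen[x] = 0
--             yield x
-- ===== SOURCE B (Python) =====
-- def dupe(old):
--     items = list(old)
--     total = {}
--     for x in items:
--         total[x] = total.get(x, 0) + 1
--     out = []
--     after = {}
--     for x in reversed(items):
--         s = after.get(x, 0)
--         c = total[x] - s - 1
--         out.append(x if c == 0 else "%s(%d)" % (x, c))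
--         after[x] = s + 1
--     yield from reversed(out)
-- ===== Notes on version B (the rewrite author's own statement) =====
-- stated objective: alternative
-- what changed: Replaces A's single forward pass with a running counter by a two-phase backward algorithm: first a pass computing total occurrence counts, then a reverse traversal that derives each element's prior-occurrence count as total minus elements-seen-behind minus one and builds the output back-to-front.
import Mathlib
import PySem

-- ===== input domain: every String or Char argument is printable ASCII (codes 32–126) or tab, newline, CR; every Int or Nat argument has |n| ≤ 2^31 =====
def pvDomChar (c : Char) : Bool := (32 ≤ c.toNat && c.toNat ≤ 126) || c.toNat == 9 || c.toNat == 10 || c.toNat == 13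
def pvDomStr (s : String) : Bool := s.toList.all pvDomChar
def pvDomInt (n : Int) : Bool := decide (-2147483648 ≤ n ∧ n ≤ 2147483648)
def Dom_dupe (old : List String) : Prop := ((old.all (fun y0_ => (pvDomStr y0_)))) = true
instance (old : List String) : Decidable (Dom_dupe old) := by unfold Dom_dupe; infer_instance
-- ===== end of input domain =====

-- B replaces A's forward pass with a dict counter by a two-phase backward algorithm
-- (total counts first, then a reverse traversal deriving prior counts arithmetically).

-- the "%s(%d)" format both Pythons use
def dupeFmt (x : String) (c : Int) : String := x ++ "(" ++ PySem.Int.toStr c ++ ")"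

-- ===== PORT A =====
-- A's loop: a dict 'seen' threaded through the forward iteration
def dupeLoopA (seen : PySem.Dict String Int) : List String → List String
  | [] => []
  | x :: xs =>
    if seen.contains x then
      let c := seen.getD x 0 + 1          -- seen[x] += 1 (key present, so getD is exact)
      dupeFmt x c :: dupeLoopA (seen.insert x c) xs
    else
      x :: dupeLoopA (seen.insert x 0) xs

def dupe (old : List String) : List String := dupeLoopA PySem.Dict.empty old

-- ===== PORT B =====
-- pass 1: total[x] = total.get(x, 0) + 1
def dupeTotals (items : List String) : PySem.Dict String Int :=
  items.foldl (fun t x => t.insert x (t.getD x 0 + 1)) PySem.Dict.empty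

-- pass 2: the loop 'for x in reversed(items)' accumulating 'out' (in processing order)
-- and 'after'; Python's total[x] is exact as getD because every x of the list is a key of total.
def dupeLoopRevB (total : PySem.Dict String Int) (after : PySem.Dict String Int) :
    List String → List String
  | [] => []
  | x :: xs =>
    let s := after.getD x 0
    let c := total.getD x 0 - s - 1
    (if c = 0 then x else dupeFmt x c) :: dupeLoopRevB total (after.insert x (s + 1)) xs

-- 'yield from reversed(out)'
def dupe_alt (old : List String) : List String :=
  (dupeLoopRevB (dupeTotals old) PySem.Dict.empty old.reverse).reverse

-- ===== PRECONDITION & SPEC =====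
def Spec_dupe (old : List String) (out : List String) : Prop := out = dupe_alt old
instance (old : List String) (out : List String) : Decidable (Spec_dupe old out) := by
  unfold Spec_dupe; infer_instance

-- ===== CLAIM =====
def Claim_equal_dupe : Prop := ∀ (old : List String), Dom_dupe old → Spec_dupe old (dupe old)

-- ===== LEMMAS AND PROOFS =====

-- the common pointwise characterisation both ports are proved equal to:
-- output for an element with already-emitted prefix 'pre'
def specLoop (pre : List String) : List String → List String
  | [] => []
  | x :: xs =>
    (if pre.count x = 0 then x else dupeFmt x ((pre.count x : Nat) : Int)) ::
      specLoop (pre ++ [x]) xs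

-- A's dict maps x to (prefix count of x) - 1 when present, is absent iff count 0
theorem dupeLoopA_eq_spec (l : List String) : ∀ (d : PySem.Dict String Int) (pre : List String),
    (∀ x, d.get? x = if pre.count x = 0 then none else some ((pre.count x : Int) - 1)) →
    dupeLoopA d l = specLoop pre l := by
  induction l with
  | nil => intro d pre _; rfl
  | cons x xs ih =>
    intro d pre h
    simp only [dupeLoopA, specLoop]
    have hc : d.contains x = (d.get? x).isSome := PySem.Dict.contains_eq_isSome_get? ..
    by_cases h0 : pre.count x = 0
    · rw [hc, h x, if_pos h0]
      simp only [Option.isSome_none, Bool.false_eq_true, if_false, h0]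
      refine congrArg₂ List.cons (by simp) ?_
      apply ih
      intro y
      by_cases hy : y = x
      · subst hy
        rw [PySem.Dict.get?_insert_self, List.count_append, h0]
        simp
      · rw [PySem.Dict.get?_insert_of_ne _ _ hy, h y, List.count_append]
        have hxy : ¬ x = y := fun hh => hy hh.symm
        simp [hxy]
    · rw [hc, h x, if_neg h0]
      have hg : d.getD x 0 = (pre.count x : Int) - 1 := by
        rw [PySem.Dict.getD_eq_get?_getD, h x, if_neg h0]; rfl
      simp only [Option.isSome_some, if_true, hg, sub_add_cancel, if_neg h0,
        List.cons.injEq, true_and]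
      apply ih
      intro y
      by_cases hy : y = x
      · subst hy
        rw [PySem.Dict.get?_insert_self, List.count_append]
        simp only [List.count_singleton]
        rw [if_neg (by simp)]
        simp only [beq_self_eq_true, if_true]
        push_cast; ring_nf
      · rw [PySem.Dict.get?_insert_of_ne _ _ hy, h y, List.count_append]
        have hxy : ¬ x = y := fun hh => hy hh.symm
        simp [hxy]

-- appending one element on the right extends specLoop by its output
theorem specLoop_append_singleton (u : List String) : ∀ (pre : List String) (x : String),
    specLoop pre (u ++ [x]) =
      specLoop pre u ++
        [if (pre ++ u).count x = 0 then x else dupeFmt x (((pre ++ u).count x : Nat) : Int)] := by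
  induction u with
  | nil => intro pre x; simp [specLoop]
  | cons a as ih =>
    intro pre x
    simp only [List.cons_append, specLoop, ih, List.cons.injEq, true_and]
    simp [List.append_assoc]

-- B's reverse loop, on u.reverse, equals the reverse of the spec on u
theorem dupeLoopRevB_eq (u : List String) : ∀ (s : List String)
    (total after : PySem.Dict String Int),
    (∀ y, after.getD y 0 = (s.count y : Int)) →
    (∀ y ∈ u, total.getD y 0 = ((u.count y + s.count y : Nat) : Int)) →
    dupeLoopRevB total after u.reverse = (specLoop [] u).reverse := by
  induction u using List.reverseRecOn with
  | nil => intro s total after _ _; rfl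
  | append_singleton u' x ih =>
    intro s total after ha ht
    rw [List.reverse_append, List.reverse_singleton, List.singleton_append]
    simp only [dupeLoopRevB]
    have hx : total.getD x 0 = (((u' ++ [x]).count x + s.count x : Nat) : Int) :=
      ht x (by simp)
    have hcount : (u' ++ [x]).count x = u'.count x + 1 := by simp
    have hc : total.getD x 0 - after.getD x 0 - 1 = ((u'.count x : Nat) : Int) := by
      rw [hx, ha x, hcount]; push_cast; ring
    have hzero : (total.getD x 0 - after.getD x 0 - 1 = 0) ↔ u'.count x = 0 := by
      rw [hc]; exact Int.natCast_eq_zero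
    rw [specLoop_append_singleton, List.reverse_append, List.reverse_singleton,
      List.singleton_append, List.nil_append]
    refine congrArg₂ List.cons ?_ ?_
    · by_cases h0 : u'.count x = 0
      · rw [if_pos (hzero.mpr h0), if_pos h0]
      · rw [if_neg (fun hh => h0 (hzero.mp hh)), if_neg h0, hc]
    · apply ih (x :: s)
      · intro y
        by_cases hy : y = x
        · subst hy
          rw [PySem.Dict.getD_insert_self, ha y, List.count_cons_self]
          push_cast; ring
        · rw [PySem.Dict.getD_insert_of_ne _ _ _ hy, ha y,
            List.count_cons_of_ne (fun hh => hy hh.symm)]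
      · intro y hy
        rw [ht y (List.mem_append_left _ hy)]
        have : (u' ++ [x]).count y + s.count y = u'.count y + (x :: s).count y := by
          by_cases hyx : y = x
          · subst hyx; simp; omega
          · rw [List.count_append, List.count_singleton,
              List.count_cons_of_ne (fun hh => hyx hh.symm)]
            simp [Ne.symm hyx]
        rw [this]

-- ===== VERDICT =====
theorem dupe_spec : Claim_equal_dupe := by
  intro old _
  show dupe old = dupe_alt old
  have hA : dupe old = specLoop [] old := by
    apply dupeLoopA_eq_spec
    intro x
    simp [PySem.Dict.get?_empty]
  have hB : dupeLoopRevB (dupeTotals old) PySem.Dict.empty old.reverse =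
      (specLoop [] old).reverse := by
    apply dupeLoopRevB_eq old []
    · intro y; simp [PySem.Dict.getD_empty]
    · intro y _
      simpa using PySem.Dict.getD_foldl_insert_add_one old PySem.Dict.empty y
  rw [hA]
  unfold dupe_alt
  rw [hB, List.reverse_reverse]
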